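-- pv_equiv track=rewrite | github.com/VishnuprakashSelvarajan/DailyCoding | Algorithms.py | getTotalExecutionTime
-- ===== SOURCE A (Python) =====
-- def getTotalExecutionTime(arr, c):
--     exec_time = 0
--     if len(arr) < 2:
--         return 1
--     seen = set()
--     index = 0
--     while index < len(arr):
--         if arr[index] in seen:
--             exec_time += 2
--         else:
--             seen.add(arr[index])
--             exec_time += 1
--         index += 1
--     return exec_time
-- ===== SOURCE B (Python) =====
-- def getTotalExecutionTime(arr, c):
--     if len(arr) < 2:
--         return 1
--     # first occurrences contribute 1, repeats contribute 2: total = 2*n - distinct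
--     return 2 * len(arr) - len(set(arr))
-- ===== Notes on version B (the rewrite author's own statement) =====
-- stated objective: simpler
-- what changed: Replaces the explicit index loop with a running set and accumulator by the closed form 2*len(arr) - len(set(arr)) under the same small-input guard.
import Mathlib
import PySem

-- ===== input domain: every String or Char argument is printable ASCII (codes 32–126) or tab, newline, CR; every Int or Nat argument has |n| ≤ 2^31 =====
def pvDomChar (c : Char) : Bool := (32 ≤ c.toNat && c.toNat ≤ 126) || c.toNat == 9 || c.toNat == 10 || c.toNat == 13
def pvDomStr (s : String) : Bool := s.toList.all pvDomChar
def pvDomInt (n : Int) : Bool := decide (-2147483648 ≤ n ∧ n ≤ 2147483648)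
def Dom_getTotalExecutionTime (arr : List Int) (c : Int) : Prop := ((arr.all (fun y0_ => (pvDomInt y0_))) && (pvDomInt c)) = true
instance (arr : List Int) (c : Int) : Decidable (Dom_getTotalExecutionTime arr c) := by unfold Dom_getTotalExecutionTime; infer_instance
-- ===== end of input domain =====

-- B replaces A's index loop with a running set and accumulator by the closed form
-- 2*len(arr) - len(set(arr)) (simpler, same guard for len(arr) < 2).

-- ===== PORT A =====
-- the while loop over index, as structural recursion over the remaining suffix,
-- carrying the same state (exec_time, seen)
def getTotalExecutionTimeLoopA : List Int → Int → PySem.Set Int → Int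
  | [], t, _ => t
  | x :: xs, t, s =>
    if PySem.Set.contains s x then getTotalExecutionTimeLoopA xs (t + 2) s
    else getTotalExecutionTimeLoopA xs (t + 1) (PySem.Set.add s x)

def getTotalExecutionTime (arr : List Int) (c : Int) : Int :=
  if arr.length < 2 then 1
  else getTotalExecutionTimeLoopA arr 0 PySem.Set.empty

-- ===== PORT B =====
def getTotalExecutionTime_alt (arr : List Int) (c : Int) : Int :=
  if arr.length < 2 then 1
  else 2 * (arr.length : Int) - ((PySem.Set.ofList arr).length : Int)

-- ===== PRECONDITION & SPEC =====
def Spec_getTotalExecutionTime (arr : List Int) (c : Int) (out : Int) : Prop := out = getTotalExecutionTime_alt arr c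
instance (arr : List Int) (c : Int) (out : Int) : Decidable (Spec_getTotalExecutionTime arr c out) := by unfold Spec_getTotalExecutionTime; infer_instance

-- ===== CLAIM (what is proved, stated in full; the proofs are below) =====
def Claim_equal_getTotalExecutionTime : Prop := ∀ (arr : List Int) (c : Int), Dom_getTotalExecutionTime arr c → Spec_getTotalExecutionTime arr c (getTotalExecutionTime arr c)

-- ===== LEMMAS AND PROOFS =====

theorem loopA_closed (xs : List Int) : ∀ (t : Int) (s : PySem.Set Int),
    getTotalExecutionTimeLoopA xs t s
      = t + 2 * (xs.length : Int) - (((PySem.Set.update s xs).length : Int) - (s.length : Int)) := by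
  induction xs with
  | nil => intro t s; simp [getTotalExecutionTimeLoopA, PySem.Set.update]
  | cons x xs ih =>
    intro t s
    simp only [getTotalExecutionTimeLoopA, PySem.Set.update, List.foldl_cons]
    by_cases h : PySem.Set.contains s x = true
    · have hadd : PySem.Set.add s x = s := by simp only [PySem.Set.add, if_pos h]
      rw [if_pos h, ih, hadd]
      simp [PySem.Set.update]
      push_cast
      ring
    · have hadd : PySem.Set.add s x = s ++ [x] := by simp only [PySem.Set.add, if_neg h]
      rw [if_neg h, ih]
      simp [PySem.Set.update, hadd]
      push_cast
      ring

theorem getTotalExecutionTime_spec : Claim_equal_getTotalExecutionTime := by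
  intro arr c _
  unfold Spec_getTotalExecutionTime getTotalExecutionTime getTotalExecutionTime_alt
  by_cases h : arr.length < 2
  · simp [h]
  · rw [if_neg h, if_neg h, loopA_closed]
    have : PySem.Set.update PySem.Set.empty arr = PySem.Set.ofList arr := by
      simp [PySem.Set.update, PySem.Set.ofList, PySem.Set.empty]
    rw [this]
    simp [PySem.Set.empty]
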